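-- pv_equiv track=rewrite | github.com/SurakiatP/slm-finetune-auto-config | src/slm_auto_config/training/classification_inference.py | normalize_label_prediction
-- ===== SOURCE A (Python) =====
-- def normalize_label_prediction(raw_prediction: str, labels: list[str]) -> str:
--     """Convert a generated answer into a single label when possible."""
--     cleaned = raw_prediction.strip().strip("`\"' ")
--     first_line = next((line.strip() for line in cleaned.splitlines() if line.strip()), "")
--     first_line = first_line.strip("`\"' ")
--     if first_line in labels:
--         return first_line
--     for label in sorted(labels, key=len, reverse=True):
--         if label and label in cleaned:
--             return label
--     return first_line
-- ===== SOURCE B (Python) =====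
-- def normalize_label_prediction(raw_prediction: str, labels: list[str]) -> str:
--     """Convert a generated answer into a single label when possible."""
--     cleaned = raw_prediction.strip().strip("`\"' ")
--     first_line = next((line.strip() for line in cleaned.splitlines() if line.strip()), "")
--     first_line = first_line.strip("`\"' ")
--     if first_line in labels:
--         return first_line
--     best = None
--     for label in labels:
--         if label and (best is None or len(label) > len(best)) and label in cleaned:
--             best = label
--     return best if best is not None else first_line
-- ===== Notes on version B (the rewrite author's own statement) =====
-- stated objective: alternative
-- what changed: Replaces A's stable length-descending sort followed by a first-match scan with a single linear pass over labels in original order that keeps the longest label contained in the cleaned text, only testing containment for labels strictly longer than the current best (so ties keep the earliest, matching the stable reverse sort), eliminating the sort.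
import Mathlib
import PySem

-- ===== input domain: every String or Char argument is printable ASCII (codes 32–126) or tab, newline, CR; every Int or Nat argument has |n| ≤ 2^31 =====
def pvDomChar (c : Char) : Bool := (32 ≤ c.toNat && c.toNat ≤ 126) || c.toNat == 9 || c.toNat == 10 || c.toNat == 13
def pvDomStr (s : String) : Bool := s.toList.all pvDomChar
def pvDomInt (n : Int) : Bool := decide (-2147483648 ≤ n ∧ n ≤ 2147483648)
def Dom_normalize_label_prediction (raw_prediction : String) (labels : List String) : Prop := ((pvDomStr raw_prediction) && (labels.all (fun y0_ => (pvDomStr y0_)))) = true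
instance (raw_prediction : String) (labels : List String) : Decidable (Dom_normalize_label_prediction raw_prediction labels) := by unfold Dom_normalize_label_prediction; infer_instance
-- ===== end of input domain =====

-- B replaces A's length-descending stable sort + first-match scan by a single linear pass that keeps
-- the longest matching label (strict '>' so ties keep the earliest); objective: alternative (no sort).

-- the test 'label and label in cleaned' shared verbatim by both loops
def pvP (cleaned label : String) : Bool := label != "" && PySem.Str.isIn label cleaned

-- ===== PORT A =====
-- next((line.strip() for line in lines if line.strip()), "")
def pvFirstLine : List String → String
  | [] => ""
  | l :: rest => if PySem.Str.strip l != "" then PySem.Str.strip l else pvFirstLine rest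

-- for label in sorted(labels, key=len, reverse=True): if label and label in cleaned: return label
def pvALoop (cleaned first_line : String) : List String → String
  | [] => first_line
  | l :: rest => if pvP cleaned l then l else pvALoop cleaned first_line rest

def normalize_label_prediction (raw_prediction : String) (labels : List String) : String :=
  let cleaned := PySem.Str.stripChars (PySem.Str.strip raw_prediction) "`\"' "
  let first_line := PySem.Str.stripChars (pvFirstLine (PySem.Str.splitlines cleaned)) "`\"' "
  if labels.contains first_line then first_line
  else pvALoop cleaned first_line (PySem.List.sorted labels (fun l => PySem.Str.len l) true)

-- ===== PORT B =====
-- one step of B's loop: 'if label and (best is None or len(label) > len(best)) and label in cleaned: best = label'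
def pvBStep (cleaned : String) (best : Option String) (label : String) : Option String :=
  if label != ""
      && (match best with | none => true | some b => decide (PySem.Str.len b < PySem.Str.len label))
      && PySem.Str.isIn label cleaned
  then some label else best

def normalize_label_prediction_alt (raw_prediction : String) (labels : List String) : String :=
  let cleaned := PySem.Str.stripChars (PySem.Str.strip raw_prediction) "`\"' "
  let first_line := PySem.Str.stripChars (pvFirstLine (PySem.Str.splitlines cleaned)) "`\"' "
  if labels.contains first_line then first_line
  else
    match labels.foldl (pvBStep cleaned) none with
    | some b => b
    | none => first_line

-- ===== PRECONDITION & SPEC =====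
def Spec_normalize_label_prediction (raw_prediction : String) (labels : List String) (out : String) : Prop := out = normalize_label_prediction_alt raw_prediction labels
instance (raw_prediction : String) (labels : List String) (out : String) : Decidable (Spec_normalize_label_prediction raw_prediction labels out) := by unfold Spec_normalize_label_prediction; infer_instance

-- ===== CLAIM (what is proved, stated in full; the proofs are below) =====
def Claim_equal_normalize_label_prediction : Prop := ∀ (raw_prediction : String) (labels : List String), Dom_normalize_label_prediction raw_prediction labels → Spec_normalize_label_prediction raw_prediction labels (normalize_label_prediction raw_prediction labels)

-- ===== LEMMAS AND PROOFS =====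

-- the un-pruned form of B's step, used only to state the loop invariant
def pvBStepSlow (cleaned : String) (best : Option String) (label : String) : Option String :=
  if pvP cleaned label then
    match best with
    | none => some label
    | some b => if PySem.Str.len b < PySem.Str.len label then some label else some b
  else best

lemma pvBStep_eq_slow (cleaned : String) (best : Option String) (label : String) :
    pvBStep cleaned best label = pvBStepSlow cleaned best label := by
  cases best with
  | none =>
    cases h1 : (label != "") <;> cases h2 : PySem.Str.isIn label cleaned <;>
      simp_all [pvBStep, pvBStepSlow, pvP]
  | some b =>
    cases h1 : (label != "") <;> cases h2 : PySem.Str.isIn label cleaned <;>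
      cases h3 : decide (PySem.Str.len b < PySem.Str.len label) <;>
        simp_all [pvBStep, pvBStepSlow, pvP]

lemma pvInsertBy_cons (bef : String → String → Bool) (x y : String) (ys : List String) :
    PySem.List.insertBy bef x (y :: ys)
      = if bef x y then x :: y :: ys else y :: PySem.List.insertBy bef x ys := by
  simp only [PySem.List.insertBy]

lemma pvALoop_eq_find? (cleaned fl : String) (ls : List String) :
    pvALoop cleaned fl ls = ((ls.find? (pvP cleaned)).getD fl) := by
  induction ls with
  | nil => rfl
  | cons l rest ih =>
    by_cases h : pvP cleaned l = true
    · rw [List.find?_cons_of_pos h]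
      simp only [pvALoop]
      rw [if_pos h]
      rfl
    · rw [List.find?_cons_of_neg (by simpa using h)]
      simp only [pvALoop]
      rw [if_neg h]
      exact ih

lemma pvFind_insertBy (cleaned x : String) (acc : List String)
    (h : acc.Pairwise (fun a b => PySem.Str.len b ≤ PySem.Str.len a)) :
    (PySem.List.insertBy (fun a b => decide (PySem.Str.len b < PySem.Str.len a)) x acc).find? (pvP cleaned)
      = pvBStepSlow cleaned (acc.find? (pvP cleaned)) x := by
  induction acc with
  | nil =>
    show List.find? (pvP cleaned) [x] = pvBStepSlow cleaned none x
    by_cases hx : pvP cleaned x = true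
    · rw [List.find?_cons_of_pos hx]
      simp only [pvBStepSlow]
      rw [if_pos hx]
    · rw [List.find?_cons_of_neg (by simpa using hx), List.find?_nil]
      simp only [pvBStepSlow]
      rw [if_neg hx]
  | cons y ys ih =>
    have hy : ∀ b ∈ ys, PySem.Str.len b ≤ PySem.Str.len y := (List.pairwise_cons.1 h).1
    have hys := (List.pairwise_cons.1 h).2
    by_cases hlt : PySem.Str.len y < PySem.Str.len x
    · rw [pvInsertBy_cons, if_pos (decide_eq_true hlt)]
      by_cases hx : pvP cleaned x = true
      · rw [List.find?_cons_of_pos hx]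
        cases hfb : (y :: ys).find? (pvP cleaned) with
        | none => simp only [pvBStepSlow]; rw [if_pos hx]
        | some b =>
          have hble : PySem.Str.len b ≤ PySem.Str.len y := by
            rcases List.mem_cons.1 (List.mem_of_find?_eq_some hfb) with rfl | hb
            · exact le_refl _
            · exact hy _ hb
          simp only [pvBStepSlow]
          rw [if_pos hx, if_pos (lt_of_le_of_lt hble hlt)]
      · rw [List.find?_cons_of_neg (by simpa using hx)]
        simp only [pvBStepSlow]
        rw [if_neg hx]
    · rw [pvInsertBy_cons, if_neg (by simp only [decide_eq_true_eq]; exact hlt)]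
      by_cases hp : pvP cleaned y = true
      · rw [List.find?_cons_of_pos hp, List.find?_cons_of_pos hp]
        by_cases hx : pvP cleaned x = true
        · simp only [pvBStepSlow]
          rw [if_pos hx, if_neg hlt]
        · simp only [pvBStepSlow]
          rw [if_neg hx]
      · rw [List.find?_cons_of_neg (by simpa using hp), List.find?_cons_of_neg (by simpa using hp),
            ih hys]

lemma pvSorted_find_eq_foldl (cleaned : String) (labels : List String) :
    ((PySem.List.sorted labels (fun l => PySem.Str.len l) true).find? (pvP cleaned))
      = labels.foldl (pvBStep cleaned) none := by
  have hstep : pvBStep cleaned = pvBStepSlow cleaned := by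
    funext best label; exact pvBStep_eq_slow cleaned best label
  rw [hstep]
  induction labels using List.reverseRecOn with
  | nil => rfl
  | append_singleton xs x ih =>
    rw [PySem.List.sorted_rev_eq_foldl_insertBy, List.foldl_append, List.foldl_append]
    simp only [List.foldl_cons, List.foldl_nil]
    rw [← PySem.List.sorted_rev_eq_foldl_insertBy]
    rw [pvFind_insertBy cleaned x _ (PySem.List.sorted_pairwise_rev xs (fun l => PySem.Str.len l)), ih]

-- ===== VERDICT (by name: the statement is the Claim_ definition above) =====
theorem normalize_label_prediction_spec : Claim_equal_normalize_label_prediction := by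
  intro raw labels _
  unfold Spec_normalize_label_prediction normalize_label_prediction normalize_label_prediction_alt
  set cleaned := PySem.Str.stripChars (PySem.Str.strip raw) "`\"' " with hc
  set fl := PySem.Str.stripChars (pvFirstLine (PySem.Str.splitlines cleaned)) "`\"' " with hf
  by_cases hmem : labels.contains fl = true
  · rw [if_pos hmem, if_pos hmem]
  · rw [if_neg hmem, if_neg hmem]
    rw [pvALoop_eq_find?, pvSorted_find_eq_foldl]
    cases labels.foldl (pvBStep cleaned) none <;> rfl
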